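-- pv_equiv track=rewrite | github.com/DmytroFrame/iwm | utils/algorithms/chunk-tracer.py | get_chunk_tracer
-- ===== SOURCE A (Python) =====
-- def get_chunk_tracer(x, z, radius):
--     points = (radius * 2) + 2
--     is_plus = True
--     result = []
--
--     result.append([x, z])
--
--     for index in range(0, points):
--         is_plus = not is_plus
--
--         for height in range(0, index):
--             if height == points - 2:
--                 break
--
--             if is_plus:
--                 z += 1
--             else:
--                 z -= 1
--
--             result.append([x, z])
--
--         if index == points - 1:
--             break
--
--         for _ in range(0, index):
--             if is_plus:
--                 x += 1
--             else:
--                 x -= 1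
--
--             result.append([x, z])
--
--     return result
-- ===== SOURCE B (Python) =====
-- def get_chunk_tracer(x, z, radius):
--     points = radius * 2 + 2
--     # Build arm descriptors: (is_z_axis, sign, length)
--     arms = []
--     for i in range(1, points - 1):
--         s = 1 if i % 2 == 1 else -1
--         arms.append((True, s, i))
--         arms.append((False, s, i))
--     if points >= 2:
--         arms.append((True, 1 if (points - 1) % 2 == 1 else -1, points - 2))
--     result = [[x, z]]
--     for is_z, s, length in arms:
--         for _ in range(length):
--             if is_z:
--                 z += s
--             else:
--                 x += s
--             result.append([x, z])
--     return result
-- ===== Notes on version B (the rewrite author's own statement) =====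
-- stated objective: alternative
-- what changed: B replaces A's nested index/height loops with embedded breaks by first building a flat table of arm descriptors (axis, sign, length) — encoding the truncated final z-arm and the dropped final x-arm as descriptor lengths — and then making one uniform walk over that table.
import Mathlib
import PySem

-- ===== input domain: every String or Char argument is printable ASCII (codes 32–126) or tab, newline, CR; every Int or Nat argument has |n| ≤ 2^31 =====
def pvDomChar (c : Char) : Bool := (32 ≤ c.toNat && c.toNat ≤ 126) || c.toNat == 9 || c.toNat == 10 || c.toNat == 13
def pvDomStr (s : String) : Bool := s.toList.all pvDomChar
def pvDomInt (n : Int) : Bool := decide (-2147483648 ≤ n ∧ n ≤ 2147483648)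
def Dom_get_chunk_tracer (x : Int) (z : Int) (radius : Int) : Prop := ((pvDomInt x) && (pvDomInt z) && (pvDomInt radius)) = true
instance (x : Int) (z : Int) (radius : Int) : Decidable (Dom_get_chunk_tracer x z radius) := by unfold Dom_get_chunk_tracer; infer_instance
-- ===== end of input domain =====

-- B replaces A's nested index/height loops with embedded breaks by a table of arm
-- descriptors built first and then a single flat walk (objective: alternative decomposition).

-- ===== PORT A =====
-- inner 'for height in range(0, index)' loop with its break
def pvA_zloop (points : Int) (isPlus : Bool) (x : Int) : List Int → Int → List (List Int) → Int × List (List Int)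
  | [], z, res => (z, res)
  | h :: hs, z, res =>
    if h = points - 2 then (z, res)
    else
      let z' := if isPlus then z + 1 else z - 1
      pvA_zloop points isPlus x hs z' (res ++ [[x, z']])

-- inner 'for _ in range(0, index)' loop
def pvA_xloop (isPlus : Bool) (z : Int) (idxs : List Int) (x : Int) (res : List (List Int)) : Int × List (List Int) :=
  idxs.foldl (fun st _ =>
    let x' := if isPlus then st.1 + 1 else st.1 - 1
    (x', st.2 ++ [[x', z]])) (x, res)

-- outer 'for index in range(0, points)' loop with its break
def pvA_outer (points : Int) : List Int → Bool → Int → Int → List (List Int) → List (List Int)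
  | [], _, _, _, res => res
  | i :: rest, isPlus, x, z, res =>
    let isPlus' := !isPlus
    let st1 := pvA_zloop points isPlus' x (PySem.List.pyRange 0 i 1) z res
    if i = points - 1 then st1.2
    else
      let st2 := pvA_xloop isPlus' st1.1 (PySem.List.pyRange 0 i 1) x st1.2
      pvA_outer points rest isPlus' st2.1 st1.1 st2.2

def get_chunk_tracer (x : Int) (z : Int) (radius : Int) : List (List Int) :=
  let points := radius * 2 + 2
  pvA_outer points (PySem.List.pyRange 0 points 1) true x z [[x, z]]

-- ===== PORT B =====
-- arm descriptors (is_z, sign, length) built first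
def pvB_arms (points : Int) : List (Bool × Int × Int) :=
  let arms := (PySem.List.pyRange 1 (points - 1) 1).foldl
    (fun acc i =>
      let s : Int := if PySem.Int.mod i 2 = 1 then 1 else -1
      acc ++ [(true, s, i), (false, s, i)]) []
  if 2 ≤ points then
    arms ++ [(true, if PySem.Int.mod (points - 1) 2 = 1 then 1 else -1, points - 2)]
  else arms

-- single flat walk over the descriptors
def pvB_walk : List (Bool × Int × Int) → Int → Int → List (List Int) → List (List Int)
  | [], _, _, res => res
  | (isZ, s, len) :: rest, x, z, res =>
    let st := (PySem.List.pyRange 0 len 1).foldl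
      (fun (st : Int × Int × List (List Int)) _ =>
        if isZ then (st.1, st.2.1 + s, st.2.2 ++ [[st.1, st.2.1 + s]])
        else (st.1 + s, st.2.1, st.2.2 ++ [[st.1 + s, st.2.1]])) (x, z, res)
    pvB_walk rest st.1 st.2.1 st.2.2

def get_chunk_tracer_alt (x : Int) (z : Int) (radius : Int) : List (List Int) :=
  let points := radius * 2 + 2
  pvB_walk (pvB_arms points) x z [[x, z]]

-- ===== PRECONDITION & SPEC =====
def Spec_get_chunk_tracer (x : Int) (z : Int) (radius : Int) (out : List (List Int)) : Prop := out = get_chunk_tracer_alt x z radius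
instance (x : Int) (z : Int) (radius : Int) (out : List (List Int)) : Decidable (Spec_get_chunk_tracer x z radius out) := by unfold Spec_get_chunk_tracer; infer_instance

-- ===== CLAIM (what is proved, stated in full; the proofs are below) =====
def Claim_equal_get_chunk_tracer : Prop := ∀ (x : Int) (z : Int) (radius : Int), Dom_get_chunk_tracer x z radius → Spec_get_chunk_tracer x z radius (get_chunk_tracer x z radius)

-- ===== LEMMAS AND PROOFS =====

-- canonical list of points produced by stepping n times along one axis
def pvSteps (isZ : Bool) (s : Int) : Nat → Int → Int → List (List Int)
  | 0, _, _ => []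
  | Nat.succ n, x, z =>
    if isZ then [x, z + s] :: pvSteps isZ s n x (z + s)
    else [x + s, z] :: pvSteps isZ s n (x + s) z

def pvSgn (i : Int) : Int := if PySem.Int.mod i 2 = 1 then 1 else -1

-- descriptors remaining from arm index a onwards (p ≥ 2)
def pvArmsFrom (p a : Int) : List (Bool × Int × Int) :=
  (PySem.List.pyRange a (p - 1) 1).flatMap (fun i => [(true, pvSgn i, i), (false, pvSgn i, i)])
    ++ [(true, pvSgn (p - 1), p - 2)]

lemma pvA_zloop_no_break (p : Int) (ip : Bool) (x : Int) (hs : List Int)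
    (hall : ∀ h ∈ hs, h ≠ p - 2) :
    ∀ z res, pvA_zloop p ip x hs z res
      = (z + (if ip then 1 else -1) * hs.length,
         res ++ pvSteps true (if ip then 1 else -1) hs.length x z) := by
  induction hs with
  | nil => intro z res; simp [pvA_zloop, pvSteps]
  | cons h t ih =>
    intro z res
    have hne : h ≠ p - 2 := hall h (by simp)
    have ht : ∀ h' ∈ t, h' ≠ p - 2 := fun h' hmem => hall h' (by simp [hmem])
    simp only [pvA_zloop, if_neg hne]
    rw [ih ht]
    cases ip <;> simp [pvSteps, sub_eq_add_neg] <;> omega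

lemma pvA_zloop_break (p : Int) (ip : Bool) (x : Int) (hs t : List Int)
    (hall : ∀ h ∈ hs, h ≠ p - 2) :
    ∀ z res, pvA_zloop p ip x (hs ++ (p - 2) :: t) z res
      = (z + (if ip then 1 else -1) * hs.length,
         res ++ pvSteps true (if ip then 1 else -1) hs.length x z) := by
  induction hs with
  | nil => intro z res; simp [pvA_zloop, pvSteps]
  | cons h t' ih =>
    intro z res
    have hne : h ≠ p - 2 := hall h (by simp)
    have ht : ∀ h' ∈ t', h' ≠ p - 2 := fun h' hmem => hall h' (by simp [hmem])
    simp only [List.cons_append, pvA_zloop, if_neg hne]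
    rw [ih ht]
    cases ip <;> simp [pvSteps, sub_eq_add_neg] <;> omega

lemma pvA_xloop_eq (ip : Bool) (z : Int) (idxs : List Int) :
    ∀ x res, pvA_xloop ip z idxs x res
      = (x + (if ip then 1 else -1) * idxs.length,
         res ++ pvSteps false (if ip then 1 else -1) idxs.length x z) := by
  induction idxs with
  | nil => intro x res; simp [pvA_xloop, pvSteps]
  | cons h t ih =>
    intro x res
    simp only [pvA_xloop, List.foldl_cons] at *
    rw [ih]
    cases ip <;> simp [pvSteps, sub_eq_add_neg] <;> omega

lemma pvB_arm_fold (isZ : Bool) (s : Int) (l : List Int) :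
    ∀ x z res, l.foldl
      (fun (st : Int × Int × List (List Int)) _ =>
        if isZ then (st.1, st.2.1 + s, st.2.2 ++ [[st.1, st.2.1 + s]])
        else (st.1 + s, st.2.1, st.2.2 ++ [[st.1 + s, st.2.1]])) (x, z, res)
      = (x + (if isZ then 0 else s * l.length),
         z + (if isZ then s * l.length else 0),
         res ++ pvSteps isZ s l.length x z) := by
  induction l with
  | nil => intro x z res; cases isZ <;> simp [pvSteps]
  | cons h t ih =>
    intro x z res
    simp only [List.foldl_cons]
    cases isZ <;> simp only [Bool.false_eq_true, if_false, if_true] at ih ⊢ <;>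
      rw [ih] <;> simp [pvSteps] <;> ring

lemma pvB_walk_cons_z (s len : Int) (rest : List (Bool × Int × Int)) (x z : Int) (res : List (List Int)) :
    pvB_walk ((true, s, len) :: rest) x z res
      = pvB_walk rest x (z + s * (PySem.List.pyRange 0 len 1).length)
          (res ++ pvSteps true s (PySem.List.pyRange 0 len 1).length x z) := by
  have hB := pvB_arm_fold true s (PySem.List.pyRange 0 len 1) x z res
  simp only [if_true] at hB
  simp only [pvB_walk, if_true]
  rw [hB]
  simp

lemma pvB_walk_cons_x (s len : Int) (rest : List (Bool × Int × Int)) (x z : Int) (res : List (List Int)) :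
    pvB_walk ((false, s, len) :: rest) x z res
      = pvB_walk rest (x + s * (PySem.List.pyRange 0 len 1).length) z
          (res ++ pvSteps false s (PySem.List.pyRange 0 len 1).length x z) := by
  have hB := pvB_arm_fold false s (PySem.List.pyRange 0 len 1) x z res
  simp only [Bool.false_eq_true, if_false] at hB
  simp only [pvB_walk, Bool.false_eq_true, if_false]
  rw [hB]
  simp

lemma pv_main (p : Int) (hp : 2 ≤ p) :
    ∀ (n : Nat) (a x z : Int) (res : List (List Int)), 1 ≤ a → a = p - 1 - n →
      pvA_outer p (PySem.List.pyRange a p 1) (decide (PySem.Int.mod a 2 = 0)) x z res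
        = pvB_walk (pvArmsFrom p a) x z res := by
  intro n
  induction n with
  | zero =>
    intro a x z res ha haeq
    have ha' : a = p - 1 := by omega
    subst ha'
    rw [PySem.List.pyRange_one_cons (by omega)]
    rw [PySem.List.pyRange_one_eq_nil (by omega)]
    simp only [pvA_outer]
    have hrange : PySem.List.pyRange 0 (p - 1) 1
        = PySem.List.pyRange 0 (p - 2) 1 ++ (p - 2) :: [] := by
      have := PySem.List.pyRange_one_succ_right (a := 0) (b := p - 2) (by omega)
      simpa [show p - 2 + 1 = p - 1 by ring] using this
    have hall : ∀ h ∈ PySem.List.pyRange 0 (p - 2) 1, h ≠ p - 2 := by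
      intro h hmem
      have := (PySem.List.mem_pyRange_one).1 hmem
      omega
    rw [hrange, pvA_zloop_break p _ x _ [] hall]
    unfold pvArmsFrom
    rw [PySem.List.pyRange_one_eq_nil (a := p - 1) (b := p - 1) (by omega)]
    simp only [List.flatMap_nil, List.nil_append, pvB_walk, if_true]
    have hB := pvB_arm_fold true (pvSgn (p - 1)) (PySem.List.pyRange 0 (p - 2) 1) x z res
    simp only [if_true] at hB
    rw [hB]
    have hsgn : pvSgn (p - 1)
        = (if (!decide (PySem.Int.mod (p - 1) 2 = 0)) = true then (1:Int) else -1) := by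
      unfold pvSgn
      by_cases h : PySem.Int.mod (p - 1) 2 = 1 <;>
        rw [PySem.Int.mod_eq_emod_of_pos (by omega)] at * <;> simp [h]
    rw [hsgn]
  | succ n ih =>
    intro a x z res ha haeq
    have halt : a ≤ p - 2 := by omega
    rw [PySem.List.pyRange_one_cons (by omega)]
    simp only [pvA_outer]
    have hall : ∀ h ∈ PySem.List.pyRange 0 a 1, h ≠ p - 2 := by
      intro h hmem
      have := (PySem.List.mem_pyRange_one).1 hmem
      omega
    rw [pvA_zloop_no_break p _ x _ hall, if_neg (by omega : ¬ a = p - 1)]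
    rw [pvA_xloop_eq]
    unfold pvArmsFrom
    rw [PySem.List.pyRange_one_cons (by omega : a < p - 1)]
    simp only [List.flatMap_cons, List.cons_append, List.append_assoc]
    rw [pvB_walk_cons_z, pvB_walk_cons_x]
    have hpar : (!decide (PySem.Int.mod a 2 = 0)) = decide (PySem.Int.mod (a + 1) 2 = 0) := by
      rw [PySem.Int.mod_eq_emod_of_pos (by omega), PySem.Int.mod_eq_emod_of_pos (by omega)]
      by_cases h : a % 2 = 0 <;> simp [h] <;> omega
    have hsgn : pvSgn a = (if (!decide (PySem.Int.mod a 2 = 0)) = true then (1:Int) else -1) := by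
      unfold pvSgn
      by_cases h : PySem.Int.mod a 2 = 1 <;>
        rw [PySem.Int.mod_eq_emod_of_pos (by omega)] at * <;> simp [h]
    rw [hsgn]
    simp only [hpar]
    rw [ih (a + 1) _ _ _ (by omega) (by omega)]
    unfold pvArmsFrom
    simp [List.append_assoc]

lemma pvB_arms_eq (p : Int) (hp : 2 ≤ p) : pvB_arms p = pvArmsFrom p 1 := by
  unfold pvB_arms pvArmsFrom
  rw [if_pos hp, PySem.List.foldl_append_eq_flatMap]
  simp [pvSgn]

theorem get_chunk_tracer_spec : Claim_equal_get_chunk_tracer := by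
  intro x z radius _
  unfold Spec_get_chunk_tracer get_chunk_tracer get_chunk_tracer_alt
  dsimp only
  by_cases h2 : 2 ≤ radius * 2 + 2
  · rw [PySem.List.pyRange_one_cons (by omega : (0:Int) < radius * 2 + 2)]
    simp only [pvA_outer]
    rw [PySem.List.pyRange_one_eq_nil (a := 0) (b := 0) le_rfl]
    simp only [pvA_zloop, pvA_xloop, List.foldl_nil]
    rw [if_neg (by omega : ¬ (0:Int) = radius * 2 + 2 - 1)]
    rw [show (!true) = decide (PySem.Int.mod 1 2 = 0) from by decide, zero_add]
    rw [pv_main (radius * 2 + 2) (by omega) (radius * 2 + 2 - 2).toNat 1 x z [[x, z]]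
      (by omega) (by omega)]
    rw [pvB_arms_eq _ (by omega)]
  · rw [PySem.List.pyRange_one_eq_nil (by omega : radius * 2 + 2 ≤ 0)]
    simp only [pvA_outer]
    unfold pvB_arms
    rw [PySem.List.pyRange_one_eq_nil (by omega : radius * 2 + 2 - 1 ≤ 1), if_neg h2]
    simp [pvB_walk]
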